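-- pv_equiv track=rewrite | github.com/google/fuzzbench | analysis/coverage_data_utils.py | get_unique_branch_dict
-- ===== SOURCE A (Python) =====
-- import collections
-- from typing import Dict, List, Tuple
--
-- def get_unique_branch_dict(benchmark_coverage_dict: Dict) -> Dict:
--     """Returns a dictionary containing the covering fuzzers for each unique
--     branch, where the |threshold| defines which branches are unique."""
--     branch_dict = collections.defaultdict(list)
--     unique_branch_dict = {}
--     threshold_count = 1
--     for fuzzer in benchmark_coverage_dict:
--         for branch in benchmark_coverage_dict[fuzzer]:
--             branch_dict[branch].append(fuzzer)
--     for branch, fuzzers in branch_dict.items():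
--         if len(fuzzers) <= threshold_count:
--             unique_branch_dict[branch] = fuzzers
--     return unique_branch_dict
-- ===== SOURCE B (Python) =====
-- def get_unique_branch_dict(benchmark_coverage_dict):
--     """Returns a dictionary containing the covering fuzzers for each unique
--     branch (branches with exactly one covering occurrence)."""
--     occurrences = [(branch, fuzzer)
--                    for fuzzer, branches in benchmark_coverage_dict.items()
--                    for branch in branches]
--     all_branches = [branch for branch, _ in occurrences]
--     return {branch: [fuzzer]
--             for branch, fuzzer in occurrences
--             if all_branches.count(branch) == 1}
-- ===== Notes on version B (the rewrite author's own statement) =====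
-- stated objective: alternative
-- what changed: B builds no per-branch index at all: it flattens the input into one (branch, fuzzer) occurrence list and keeps each occurrence whose branch appears exactly once in the flattened branch stream (a direct count scan), instead of A's grouping dict filtered by group length.
import Mathlib
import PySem

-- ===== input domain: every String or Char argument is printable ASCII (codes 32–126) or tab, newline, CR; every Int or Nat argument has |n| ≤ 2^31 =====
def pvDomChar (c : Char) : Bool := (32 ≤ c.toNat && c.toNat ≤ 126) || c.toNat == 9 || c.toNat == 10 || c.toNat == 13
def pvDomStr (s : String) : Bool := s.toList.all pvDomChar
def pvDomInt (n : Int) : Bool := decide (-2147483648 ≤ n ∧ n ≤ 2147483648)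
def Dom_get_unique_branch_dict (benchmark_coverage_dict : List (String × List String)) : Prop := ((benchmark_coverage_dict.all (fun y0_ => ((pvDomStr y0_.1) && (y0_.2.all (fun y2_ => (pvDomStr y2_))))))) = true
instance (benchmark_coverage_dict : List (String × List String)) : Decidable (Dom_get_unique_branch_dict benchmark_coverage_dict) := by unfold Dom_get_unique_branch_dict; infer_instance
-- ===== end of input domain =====

-- B flattens the input into one (branch, fuzzer) occurrence list and keeps the occurrences whose
-- branch appears exactly once in the flattened branch stream (a direct count scan, no grouping
-- index), instead of A's defaultdict grouping filtered by group length (alternative algorithm).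


-- ===== PORT A =====
def get_unique_branch_dict (benchmark_coverage_dict : List (String × List String)) : List (String × List String) :=
  -- branch_dict = defaultdict(list); for fuzzer: for branch: branch_dict[branch].append(fuzzer)
  let branch_dict : PySem.Dict String (List String) :=
    benchmark_coverage_dict.foldl
      (fun d fb => fb.2.foldl (fun d branch => d.modify branch [] (· ++ [fb.1])) d)
      PySem.Dict.empty
  -- threshold_count = 1; keep branches with len(fuzzers) <= threshold_count
  let unique_branch_dict : PySem.Dict String (List String) :=
    branch_dict.items.foldl
      (fun u bf => if bf.2.length ≤ 1 then u.insert bf.1 bf.2 else u)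
      PySem.Dict.empty
  unique_branch_dict.items

-- ===== PORT B =====
def get_unique_branch_dict_alt (benchmark_coverage_dict : List (String × List String)) : List (String × List String) :=
  -- occurrences = [(branch, fuzzer) for fuzzer, branches in d.items() for branch in branches]
  let occurrences : List (String × String) :=
    benchmark_coverage_dict.flatMap (fun fb => fb.2.map (fun branch => (branch, fb.1)))
  -- all_branches = [branch for branch, _ in occurrences]
  let all_branches : List String := occurrences.map (·.1)
  -- {branch: [fuzzer] for branch, fuzzer in occurrences if all_branches.count(branch) == 1}
  (occurrences.foldl
    (fun r p => if PySem.List.count all_branches p.1 == 1 then r.insert p.1 [p.2] else r)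
    PySem.Dict.empty).items

-- ===== PRECONDITION & SPEC =====
def Spec_get_unique_branch_dict (benchmark_coverage_dict : List (String × List String)) (out : List (String × List String)) : Prop := out = get_unique_branch_dict_alt benchmark_coverage_dict
instance (benchmark_coverage_dict : List (String × List String)) (out : List (String × List String)) : Decidable (Spec_get_unique_branch_dict benchmark_coverage_dict out) := by unfold Spec_get_unique_branch_dict; infer_instance

-- ===== CLAIM =====
def Claim_equal_get_unique_branch_dict : Prop := ∀ (benchmark_coverage_dict : List (String × List String)), Dom_get_unique_branch_dict benchmark_coverage_dict → Spec_get_unique_branch_dict benchmark_coverage_dict (get_unique_branch_dict benchmark_coverage_dict)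

-- ===== LEMMAS AND PROOFS =====

-- The (branch, fuzzer) occurrence stream both programs traverse.
def pvPairs (l : List (String × List String)) : List (String × String) :=
  l.flatMap (fun fb => fb.2.map (fun b => (b, fb.1)))
def pvKeys (l : List (String × List String)) : List String := (pvPairs l).map (·.1)
def pvGroup (l : List (String × List String)) (b : String) : List String :=
  ((pvPairs l).filter (fun p => p.1 == b)).map (·.2)

theorem pvPairs_cons (fb : String × List String) (l : List (String × List String)) :
    pvPairs (fb :: l) = fb.2.map (fun b => (b, fb.1)) ++ pvPairs l := rfl

-- A's nested fuzzer/branch loops are a single fold over the occurrence stream.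
theorem foldl_pairs {σ : Type} (g : σ → String × String → σ)
    (l : List (String × List String)) (i : σ) :
    l.foldl (fun s fb => fb.2.foldl (fun s b => g s (b, fb.1)) s) i
      = (pvPairs l).foldl g i := by
  induction l generalizing i with
  | nil => rfl
  | cons fb t ih =>
    simp only [List.foldl_cons, pvPairs_cons, List.foldl_append, List.foldl_map, ih]

-- A's output: first-occurrence-ordered distinct branches with their full fuzzer groups,
-- filtered to groups of length at most one.
theorem A_char (l : List (String × List String)) :
    get_unique_branch_dict l
      = (((PySem.Set.ofList (pvKeys l)).map (fun b => (b, pvGroup l b))).filter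
          (fun bf => decide (bf.2.length ≤ 1))) := by
  show (List.foldl (fun u bf => if bf.2.length ≤ 1 then u.insert bf.1 bf.2 else u) PySem.Dict.empty
      (List.foldl (fun d fb => fb.2.foldl (fun d branch => d.modify branch [] (· ++ [fb.1])) d)
        PySem.Dict.empty l).items).items = _
  rw [show (List.foldl (fun d fb => fb.2.foldl (fun d branch => d.modify branch [] (· ++ [fb.1])) d)
        PySem.Dict.empty l)
      = (pvPairs l).foldl (fun d p => d.modify p.1 [] (· ++ [p.2])) PySem.Dict.empty
    from foldl_pairs (fun d p => d.modify p.1 [] (· ++ [p.2])) l PySem.Dict.empty]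
  set D := (pvPairs l).foldl (fun d p => d.modify p.1 [] (· ++ [p.2])) PySem.Dict.empty with hD
  have hkeys : D.keys = PySem.Set.ofList (pvKeys l) := by
    have h := PySem.Dict.keys_foldl_modify_key (pvPairs l) (fun p => p.1) []
      (fun _ p => (· ++ [p.2])) PySem.Dict.empty
    simpa [PySem.Set.update, PySem.Set.ofList_eq_foldl, pvKeys] using h
  have hnd : D.keys.Nodup := by
    exact PySem.Dict.nodup_keys_foldl_modify_key (pvPairs l) (fun p => p.1) []
      (fun _ p => (· ++ [p.2])) PySem.Dict.empty PySem.Dict.nodup_keys_empty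
  have hitems : D.items = (PySem.Set.ofList (pvKeys l)).map (fun b => (b, pvGroup l b)) := by
    rw [PySem.Dict.items_eq_map_keys D hnd [], hkeys]
    apply List.map_congr_left
    intro b _
    have hg := PySem.Dict.getD_foldl_modify_append (pvPairs l) PySem.Dict.empty b
    simp only [PySem.Dict.getD_empty, List.nil_append] at hg
    rw [pvGroup, ← hg]
  rw [hitems]
  rw [PySem.List.foldl_ite_eq_foldl_filter (p := fun bf : String × List String => bf.2.length ≤ 1)
    (f := fun u : PySem.Dict String (List String) => fun bf => u.insert bf.1 bf.2)]
  have hndf : ((((PySem.Set.ofList (pvKeys l)).map (fun b => (b, pvGroup l b))).filter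
      (fun bf => decide (bf.2.length ≤ 1))).map Prod.fst).Nodup := by
    have hsub : ((((PySem.Set.ofList (pvKeys l)).map (fun b => (b, pvGroup l b))).filter
        (fun bf => decide (bf.2.length ≤ 1))).map Prod.fst).Sublist
        (((PySem.Set.ofList (pvKeys l)).map (fun b => (b, pvGroup l b))).map Prod.fst) :=
      List.filter_sublist.map Prod.fst
    have : (((PySem.Set.ofList (pvKeys l)).map (fun b => (b, pvGroup l b))).map Prod.fst)
        = PySem.Set.ofList (pvKeys l) := by simp [Function.comp_def]
    rw [this] at hsub
    exact hsub.nodup (PySem.Set.nodup_ofList _)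
  rw [PySem.Dict.items_foldl_insert_fresh _ Prod.fst Prod.snd PySem.Dict.empty
    (fun a _ => PySem.Dict.contains_empty a.1) hndf]
  simp [PySem.Dict.empty]

-- length of a branch's group is its count in the key stream
theorem group_length (l : List (String × List String)) (b : String) :
    (pvGroup l b).length = List.count b (pvKeys l) := by
  simp [pvGroup, pvKeys, List.count, List.countP_map, Function.comp_def,
    ← List.countP_eq_length_filter]

-- B's output: the occurrences whose branch counts exactly once, as singleton groups.
theorem B_char (l : List (String × List String)) :
    get_unique_branch_dict_alt l
      = ((pvPairs l).filter (fun p => PySem.List.count (pvKeys l) p.1 == 1)).map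
          (fun p => (p.1, [p.2])) := by
  show (List.foldl
      (fun r p => if PySem.List.count ((l.flatMap (fun fb => fb.2.map (fun branch => (branch, fb.1)))).map (·.1)) p.1 == 1
        then r.insert p.1 [p.2] else r)
      PySem.Dict.empty (l.flatMap (fun fb => fb.2.map (fun branch => (branch, fb.1))))).items = _
  have hocc : (l.flatMap (fun fb => fb.2.map (fun branch => (branch, fb.1)))) = pvPairs l := rfl
  rw [hocc]
  have hK : ((pvPairs l).map (·.1)) = pvKeys l := rfl
  rw [hK]
  have hfold := PySem.List.foldl_if_eq_foldl_filter
    (fun p : String × String => PySem.List.count (pvKeys l) p.1 == 1)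
    (fun r : PySem.Dict String (List String) => fun p => r.insert p.1 [p.2])
    (pvPairs l) PySem.Dict.empty
  rw [hfold]
  have hndf : (((pvPairs l).filter (fun p => PySem.List.count (pvKeys l) p.1 == 1)).map
      (fun p : String × String => p.1)).Nodup := by
    rw [List.nodup_iff_count_le_one]
    intro a
    by_cases ha : a ∈ ((pvPairs l).filter (fun p => PySem.List.count (pvKeys l) p.1 == 1)).map
        (fun p : String × String => p.1)
    · obtain ⟨p, hp, rfl⟩ := List.mem_map.mp ha
      have hc : List.count p.1 (pvKeys l) = 1 := by
        have := List.of_mem_filter hp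
        simpa [PySem.List.count] using this
      have hsub : (((pvPairs l).filter (fun p => PySem.List.count (pvKeys l) p.1 == 1)).map
          (fun p : String × String => p.1)).Sublist (pvKeys l) :=
        List.filter_sublist.map (fun p : String × String => p.1)
      calc List.count p.1 _ ≤ List.count p.1 (pvKeys l) := hsub.count_le p.1
        _ = 1 := hc
    · rw [List.count_eq_zero_of_not_mem ha]
      exact Nat.zero_le 1
  have hfresh := PySem.Dict.items_foldl_insert_fresh
    ((pvPairs l).filter (fun p => PySem.List.count (pvKeys l) p.1 == 1))
    (fun p : String × String => p.1) (fun p : String × String => [p.2]) PySem.Dict.empty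
    (fun a _ => PySem.Dict.contains_empty a.1) hndf
  rw [hfresh]
  simp [PySem.Dict.empty]

-- a branch counted once has exactly its single covering fuzzer in its group
theorem group_singleton (l : List (String × List String)) (p : String × String)
    (hp : p ∈ pvPairs l) (hc : List.count p.1 (pvKeys l) = 1) :
    pvGroup l p.1 = [p.2] := by
  have hmemF : p ∈ (pvPairs l).filter (fun q => q.1 == p.1) :=
    List.mem_filter.mpr ⟨hp, by simp⟩
  have hlen : ((pvPairs l).filter (fun q => q.1 == p.1)).length = 1 := by
    have h2 := group_length l p.1
    simp only [pvGroup, List.length_map] at h2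
    rw [h2]; exact hc
  obtain ⟨x, hx⟩ := List.length_eq_one_iff.mp hlen
  rw [hx] at hmemF
  simp at hmemF
  rw [pvGroup, hx, ← hmemF]
  rfl

theorem decide_le_one_eq (c : Nat) (h : 1 ≤ c) : decide (c ≤ 1) = (c == 1) := by
  by_cases hc : c = 1
  · subst hc; simp
  · have h2 : ¬ (c ≤ 1) := by omega
    simp [hc, h2]

-- First-occurrence dedup is the identity on elements a predicate limits to count ≤ 1.
theorem filter_foldl_add (q : String → Bool) (xs : List String) : ∀ s : List String,
    (∀ b, q b = true → s.count b + xs.count b ≤ 1) →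
    (xs.foldl PySem.Set.add s).filter q = s.filter q ++ xs.filter q := by
  induction xs with
  | nil => simp
  | cons a t ih =>
    intro s h
    simp only [List.foldl_cons]
    have hadd : PySem.Set.add s a = if a ∈ s then s else s ++ [a] := by
      simp [PySem.Set.add, PySem.Set.contains]
    by_cases hm : a ∈ s
    · rw [hadd, if_pos hm, ih s (fun b hb => by
        have h2 := h b hb; rw [List.count_cons] at h2; omega)]
      have hqa : q a = false := by
        rcases Bool.eq_false_or_eq_true (q a) with hq | hq
        · exfalso
          have h1 : 1 ≤ s.count a := List.one_le_count_iff.mpr hm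
          have h2 := h a hq
          rw [List.count_cons] at h2
          simp at h2
          omega
        · exact hq
      simp [hqa]
    · rw [hadd, if_neg hm, ih (s ++ [a]) (fun b hb => by
        have h2 := h b hb
        rw [List.count_cons] at h2
        rw [List.count_append]
        by_cases hba : a = b
        · subst hba; simp at h2 ⊢; omega
        · have hne : (a == b) = false := by simp [hba]
          simp [hne, List.count_singleton] at h2 ⊢
          omega)]
      by_cases hq : q a = true <;> simp [hq]

theorem filter_ofList (q : String → Bool) (xs : List String)
    (h : ∀ b, q b = true → xs.count b ≤ 1) :
    (PySem.Set.ofList xs).filter q = xs.filter q := by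
  rw [PySem.Set.ofList_eq_foldl]
  simpa using filter_foldl_add q xs [] (by simpa using h)

theorem AB (l : List (String × List String)) :
    get_unique_branch_dict l = get_unique_branch_dict_alt l := by
  rw [A_char, B_char]
  set K := pvKeys l with hK
  set q : String → Bool := fun b => PySem.List.count K b == 1 with hq
  set f : String → String × List String := fun b => (b, pvGroup l b) with hf
  have hA : (((PySem.Set.ofList K).map f).filter (fun bf => decide (bf.2.length ≤ 1)))
      = (K.filter q).map f := by
    rw [List.filter_map]
    rw [List.filter_congr (fun b hb => by
      have hmem : b ∈ K := (PySem.Set.mem_ofList K b).mp hb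
      have h1 : 1 ≤ List.count b K := List.one_le_count_iff.mpr hmem
      show ((fun bf => decide (bf.2.length ≤ 1)) ∘ f) b = q b
      simp only [Function.comp_apply, hf, hq, group_length, PySem.List.count]
      rw [← hK, decide_le_one_eq _ h1])]
    rw [filter_ofList q K (fun b hb => by
      have : List.count b K = 1 := by simpa [hq, PySem.List.count] using hb
      omega)]
  have hB : (((pvPairs l).filter (fun p => PySem.List.count K p.1 == 1)).map
        (fun p => (p.1, [p.2])))
      = (K.filter q).map f := by
    rw [List.map_congr_left (fun p hp => by
      have hp' := List.mem_filter.mp hp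
      have hc : List.count p.1 K = 1 := by
        simpa [PySem.List.count] using hp'.2
      show (p.1, [p.2]) = (f ∘ (fun p : String × String => p.1)) p
      simp only [Function.comp_apply, hf]
      rw [group_singleton l p hp'.1 hc])]
    rw [← List.map_map]
    congr 1
    rw [hK]
    symm
    show ((pvPairs l).map (fun p => p.1)).filter q = _
    rw [List.filter_map]
    rfl
  rw [hA, hB]

-- ===== VERDICT =====
theorem get_unique_branch_dict_spec : Claim_equal_get_unique_branch_dict := by
  intro l _
  exact AB l
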